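-- pv_equiv track=rewrite | github.com/tony20202021/words | language-learning-bot/writing_images_service/app/ai/prompt/prompt_builder.py | _analyze_prompt_elements
-- ===== SOURCE A (Python) =====
-- from typing import Dict, Any, Optional, List, Tuple, Union
--
-- def _analyze_prompt_elements(prompt: str) -> Dict[str, List[str]]:
--     """
--     Анализирует элементы промпта по категориям.
--
--     Args:
--         prompt: Промпт для анализа
--
--     Returns:
--         Dict[str, List[str]]: Элементы по категориям
--     """
--     elements = {
--         "visual": [],
--         "style": [],
--         "quality": [],
--         "composition": [],
--         "cultural": [],
--         "semantic": []
--     }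
--
--     # Разбиваем промпт на части
--     parts = [part.strip() for part in prompt.split(",")]
--
--     for part in parts:
--         part_lower = part.lower()
--
--         # Классификация по ключевым словам
--         if any(keyword in part_lower for keyword in ["color", "texture", "light", "shadow"]):
--             elements["visual"].append(part)
--         elif any(keyword in part_lower for keyword in ["style", "illustration", "artwork", "painting"]):
--             elements["style"].append(part)
--         elif any(keyword in part_lower for keyword in ["masterpiece", "quality", "detailed", "resolution"]):
--             elements["quality"].append(part)
--         elif any(keyword in part_lower for keyword in ["composition", "layout", "focal", "balance"]):
--             elements["composition"].append(part)
--         elif any(keyword in part_lower for keyword in ["chinese", "traditional", "cultural", "wisdom"]):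
--             elements["cultural"].append(part)
--         else:
--             elements["semantic"].append(part)
--
--     return elements
-- ===== SOURCE B (Python) =====
-- CATEGORIES = [
--     ("visual", ["color", "texture", "light", "shadow"]),
--     ("style", ["style", "illustration", "artwork", "painting"]),
--     ("quality", ["masterpiece", "quality", "detailed", "resolution"]),
--     ("composition", ["composition", "layout", "focal", "balance"]),
--     ("cultural", ["chinese", "traditional", "cultural", "wisdom"]),
-- ]
--
--
-- def _classify(part_lower):
--     for name, keywords in CATEGORIES:
--         if any(keyword in part_lower for keyword in keywords):
--             return name
--     return "semantic"
--
--
-- def _analyze_prompt_elements(prompt):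
--     parts = [part.strip() for part in prompt.split(",")]
--     labels = [_classify(part.lower()) for part in parts]
--     names = [name for name, _ in CATEGORIES] + ["semantic"]
--     return {name: [p for p, l in zip(parts, labels) if l == name]
--             for name in names}
-- ===== Notes on version B (the rewrite author's own statement) =====
-- stated objective: idiomatic
-- what changed: Replaces the six-branch if-elif chain with a data-driven ordered CATEGORIES table and a first-match classifier, then builds the result per category by filtering the labelled parts instead of appending in one pass.
import Mathlib
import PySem

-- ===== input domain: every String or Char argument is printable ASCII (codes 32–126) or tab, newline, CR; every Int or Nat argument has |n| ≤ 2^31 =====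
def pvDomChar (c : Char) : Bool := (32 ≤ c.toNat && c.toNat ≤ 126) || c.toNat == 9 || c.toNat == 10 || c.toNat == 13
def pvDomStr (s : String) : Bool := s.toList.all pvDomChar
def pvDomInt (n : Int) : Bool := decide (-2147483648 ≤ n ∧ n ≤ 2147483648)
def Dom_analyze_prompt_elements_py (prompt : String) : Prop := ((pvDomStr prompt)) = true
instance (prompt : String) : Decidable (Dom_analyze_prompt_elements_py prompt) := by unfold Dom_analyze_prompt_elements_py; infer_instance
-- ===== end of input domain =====

-- B replaces A's six-branch if-elif chain by a data-driven category table with a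
-- first-match classifier and builds the result per category by filtering (idiomatic).

-- ===== PORT A =====
-- state: the six dict buckets (fixed keys, insertion order) as a 6-tuple of lists
def pvAStep (st : List String × List String × List String × List String × List String × List String)
    (part : String) : List String × List String × List String × List String × List String × List String :=
  let pl := PySem.Str.lower part
  let (v, s, q, c, cu, se) := st
  if ["color", "texture", "light", "shadow"].any (fun k => PySem.Str.isIn k pl) then
    (v ++ [part], s, q, c, cu, se)
  else if ["style", "illustration", "artwork", "painting"].any (fun k => PySem.Str.isIn k pl) then
    (v, s ++ [part], q, c, cu, se)
  else if ["masterpiece", "quality", "detailed", "resolution"].any (fun k => PySem.Str.isIn k pl) then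
    (v, s, q ++ [part], c, cu, se)
  else if ["composition", "layout", "focal", "balance"].any (fun k => PySem.Str.isIn k pl) then
    (v, s, q, c ++ [part], cu, se)
  else if ["chinese", "traditional", "cultural", "wisdom"].any (fun k => PySem.Str.isIn k pl) then
    (v, s, q, c, cu ++ [part], se)
  else
    (v, s, q, c, cu, se ++ [part])

def analyze_prompt_elements_py (prompt : String) : List (String × List String) :=
  let parts := (((PySem.Str.split? prompt ",").getD [])).map PySem.Str.strip
  let (v, s, q, c, cu, se) := parts.foldl pvAStep ([], [], [], [], [], [])
  [("visual", v), ("style", s), ("quality", q), ("composition", c), ("cultural", cu), ("semantic", se)]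

-- ===== PORT B =====
def pvCategories : List (String × List String) :=
  [("visual", ["color", "texture", "light", "shadow"]),
   ("style", ["style", "illustration", "artwork", "painting"]),
   ("quality", ["masterpiece", "quality", "detailed", "resolution"]),
   ("composition", ["composition", "layout", "focal", "balance"]),
   ("cultural", ["chinese", "traditional", "cultural", "wisdom"])]

-- first category whose keyword list matches; "semantic" if none
def pvClassify (table : List (String × List String)) (pl : String) : String :=
  match table with
  | [] => "semantic"
  | (name, kws) :: rest =>
    if kws.any (fun k => PySem.Str.isIn k pl) then name else pvClassify rest pl

def analyze_prompt_elements_py_alt (prompt : String) : List (String × List String) :=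
  let parts := (((PySem.Str.split? prompt ",").getD [])).map PySem.Str.strip
  let labels := parts.map (fun p => pvClassify pvCategories (PySem.Str.lower p))
  let names := pvCategories.map Prod.fst ++ ["semantic"]
  names.map (fun n => (n, ((parts.zip labels).filter (fun pl => pl.2 == n)).map Prod.fst))

-- ===== PRECONDITION & SPEC =====
def Spec_analyze_prompt_elements_py (prompt : String) (out : List (String × List String)) : Prop := out = analyze_prompt_elements_py_alt prompt
instance (prompt : String) (out : List (String × List String)) : Decidable (Spec_analyze_prompt_elements_py prompt out) := by unfold Spec_analyze_prompt_elements_py; infer_instance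

-- ===== CLAIM (what is proved, stated in full; the proofs are below) =====
def Claim_equal_analyze_prompt_elements_py : Prop := ∀ (prompt : String), Dom_analyze_prompt_elements_py prompt → Spec_analyze_prompt_elements_py prompt (analyze_prompt_elements_py prompt)

-- ===== LEMMAS AND PROOFS =====

-- B's bucket for name n over a list of parts
def pvBucket (parts : List String) (n : String) : List String :=
  ((parts.zip (parts.map (fun p => pvClassify pvCategories (PySem.Str.lower p)))).filter
    (fun pl => pl.2 == n)).map Prod.fst

theorem pvBucket_nil (n : String) : pvBucket [] n = [] := rfl

theorem pvBucket_cons (p : String) (parts : List String) (n : String) :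
    pvBucket (p :: parts) n =
      (if pvClassify pvCategories (PySem.Str.lower p) == n then [p] else []) ++ pvBucket parts n := by
  simp only [pvBucket, List.map_cons, List.zip_cons_cons, List.filter_cons]
  split_ifs with h <;> simp_all

set_option maxHeartbeats 2000000 in
theorem pvAStep_eq (v s q c cu se : List String) (p : String) :
    pvAStep (v, s, q, c, cu, se) p =
      (v ++ (if pvClassify pvCategories (PySem.Str.lower p) == "visual" then [p] else []),
       s ++ (if pvClassify pvCategories (PySem.Str.lower p) == "style" then [p] else []),
       q ++ (if pvClassify pvCategories (PySem.Str.lower p) == "quality" then [p] else []),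
       c ++ (if pvClassify pvCategories (PySem.Str.lower p) == "composition" then [p] else []),
       cu ++ (if pvClassify pvCategories (PySem.Str.lower p) == "cultural" then [p] else []),
       se ++ (if pvClassify pvCategories (PySem.Str.lower p) == "semantic" then [p] else [])) := by
  simp only [pvAStep, pvClassify, pvCategories]
  split_ifs <;> simp_all

theorem pvAStep_invariant (parts : List String)
    (v s q c cu se : List String) :
    parts.foldl pvAStep (v, s, q, c, cu, se) =
      (v ++ pvBucket parts "visual", s ++ pvBucket parts "style", q ++ pvBucket parts "quality",
       c ++ pvBucket parts "composition", cu ++ pvBucket parts "cultural", se ++ pvBucket parts "semantic") := by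
  induction parts generalizing v s q c cu se with
  | nil => simp [pvBucket_nil]
  | cons p rest ih =>
    simp only [List.foldl_cons, pvAStep_eq, ih, pvBucket_cons, List.append_assoc]

-- ===== VERDICT (by name: the statement is the Claim_ definition above) =====
theorem analyze_prompt_elements_py_spec : Claim_equal_analyze_prompt_elements_py := by
  intro prompt _
  unfold Spec_analyze_prompt_elements_py analyze_prompt_elements_py analyze_prompt_elements_py_alt
  simp only [pvAStep_invariant, List.nil_append]
  rfl
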